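-- pv_equiv track=rewrite | github.com/dylantaylor548/kmer-project | kmer_project_master.py | rem_redun_kmer
-- ===== SOURCE A (Python) =====
-- import copy
--
-- def rem_redun_kmer(kmerdict):
--     all_kmers = []
--     filtered_dict = copy.deepcopy(kmerdict)
--     for kmer_list in filtered_dict.values():
--         for kmer in kmer_list:
--             all_kmers.append(kmer)
--     for kmer in all_kmers:
--         if all_kmers.count(kmer) == len(filtered_dict):
--             for key in filtered_dict:
--                 if kmer in filtered_dict[key]:
--                     filtered_dict[key].remove(kmer)
--     return filtered_dict
-- ===== SOURCE B (Python) =====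
-- def rem_redun_kmer(kmerdict):
--     n = len(kmerdict)
--     counts = {}
--     for lst in kmerdict.values():
--         for k in lst:
--             counts[k] = counts.get(k, 0) + 1
--     return {key: [k for k in lst if counts.get(k, 0) != n] for key, lst in kmerdict.items()}
-- ===== Notes on version B (the rewrite author's own statement) =====
-- stated objective: faster
-- what changed: One pass builds a count table of total occurrences per kmer, then each value list is rebuilt by a filter keeping kmers whose total count differs from len(kmerdict), replacing A's flatten-then-per-occurrence scan-and-remove (list.count plus list.remove inside nested loops).
import Mathlib
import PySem

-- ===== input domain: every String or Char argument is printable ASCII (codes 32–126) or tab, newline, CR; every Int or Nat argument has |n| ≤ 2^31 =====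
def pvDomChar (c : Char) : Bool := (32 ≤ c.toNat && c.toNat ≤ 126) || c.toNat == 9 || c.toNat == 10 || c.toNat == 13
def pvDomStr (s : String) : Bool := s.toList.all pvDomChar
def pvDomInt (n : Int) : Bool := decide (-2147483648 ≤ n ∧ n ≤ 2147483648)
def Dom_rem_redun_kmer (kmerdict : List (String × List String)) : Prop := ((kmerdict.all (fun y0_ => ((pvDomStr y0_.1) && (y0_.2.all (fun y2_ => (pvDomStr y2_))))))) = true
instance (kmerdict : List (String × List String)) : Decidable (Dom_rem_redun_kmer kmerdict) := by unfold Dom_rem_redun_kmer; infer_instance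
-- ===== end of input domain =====

-- B replaces A's flatten-then-per-occurrence scan-and-remove by one counting pass plus a per-key filter (faster: no repeated list.count / list.remove scans).

-- ===== PORT A =====
-- A receives a Python dict: the association-list argument is read as dict(pairs) (first position, last value).
-- copy.deepcopy is value copying; the port works on immutable values, so it is the dict itself.
def rem_redun_kmer (kmerdict : List (String × List String)) : List (String × List String) :=
  let filtered_dict := PySem.Dict.ofList kmerdict
  let all_kmers := filtered_dict.values.foldl
    (fun acc kmer_list => kmer_list.foldl (fun acc kmer => acc ++ [kmer]) acc) []
  let final := all_kmers.foldl (fun fd kmer =>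
    if PySem.List.count all_kmers kmer = fd.size then
      -- for key in filtered_dict: keys are never added/removed, so iterating the current keys is exact
      fd.keys.foldl (fun fd2 key =>
        -- filtered_dict[key]: key is always present, so the [] default of getD is never used
        if (fd2.getD key []).contains kmer then
          fd2.insert key ((PySem.List.remove? (fd2.getD key []) kmer).getD (fd2.getD key []))
        else fd2) fd
    else fd) filtered_dict
  final.items

-- ===== PORT B =====
def rem_redun_kmer_alt (kmerdict : List (String × List String)) : List (String × List String) :=
  let d := PySem.Dict.ofList kmerdict
  let n : Int := (d.size : Int)
  let counts := d.values.foldl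
    (fun c lst => lst.foldl (fun c k => c.insert k (c.getD k 0 + 1)) c)
    (PySem.Dict.empty : PySem.Dict String Int)
  d.items.map (fun p => (p.1, p.2.filter (fun k => decide (counts.getD k 0 ≠ n))))

-- ===== PRECONDITION & SPEC =====
def Spec_rem_redun_kmer (kmerdict : List (String × List String)) (out : List (String × List String)) : Prop := out = rem_redun_kmer_alt kmerdict
instance (kmerdict : List (String × List String)) (out : List (String × List String)) : Decidable (Spec_rem_redun_kmer kmerdict out) := by unfold Spec_rem_redun_kmer; infer_instance

-- ===== CLAIM (what is proved, stated in full; the proofs are below) =====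
def Claim_equal_rem_redun_kmer : Prop := ∀ (kmerdict : List (String × List String)), Dom_rem_redun_kmer kmerdict → Spec_rem_redun_kmer kmerdict (rem_redun_kmer kmerdict)

-- ===== LEMMAS AND PROOFS =====

-- A's per-key action on one value list: remove the first occurrence of kmer if present.
def pvG (kmer : String) (l : List String) : List String :=
  if l.contains kmer then (PySem.List.remove? l kmer).getD l else l

theorem pvG_eq_erase (kmer : String) (l : List String) : pvG kmer l = l.erase kmer := by
  unfold pvG
  by_cases h : kmer ∈ l
  · rw [if_pos (by simpa using h), PySem.List.remove?_eq_some_erase l kmer h]; rfl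
  · rw [if_neg (by simpa using h), List.erase_of_not_mem h]

-- A's flatten loop builds values.flatten.
theorem pv_all_kmers_eq (ls : List (List String)) (acc : List String) :
    ls.foldl (fun acc kmer_list => kmer_list.foldl (fun acc kmer => acc ++ [kmer]) acc) acc
      = acc ++ ls.flatten := by
  induction ls generalizing acc with
  | nil => simp
  | cons l ls ih =>
      rw [List.foldl_cons, PySem.List.foldl_append_singleton, ih, List.flatten_cons,
        List.append_assoc]

-- B's nested counting loop computes occurrence counts in values.flatten.
theorem pv_counts_spec (ls : List (List String)) (c : PySem.Dict String Int) (v : String) :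
    (ls.foldl (fun c lst => lst.foldl (fun c k => c.insert k (c.getD k 0 + 1)) c) c).getD v 0
      = c.getD v 0 + (List.count v ls.flatten : Int) := by
  induction ls generalizing c with
  | nil => simp
  | cons l ls ih =>
      simp [List.foldl_cons, ih, PySem.Dict.getD_foldl_insert_add_one, List.count_append]
      ring

-- erasing an element the filter drops anyway does not change the filter.
theorem pv_filter_erase (p : String → Bool) (x : String) (hx : p x = false) :
    ∀ l : List String, (l.erase x).filter p = l.filter p := by
  intro l
  induction l with
  | nil => simp
  | cons a l ih =>
      by_cases h : a = x
      · subst h; simp [List.erase_cons_head, hx]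
      · rw [List.erase_cons_tail (by simpa using h)]
        simp [List.filter_cons, ih]

-- one step of A's inner key loop rewrites the items list at one key.
theorem pv_step_items (kmer key : String) (fd : PySem.Dict String (List String))
    (hnd : fd.keys.Nodup) (hc : fd.contains key = true) :
    (if (fd.getD key []).contains kmer then
        fd.insert key ((PySem.List.remove? (fd.getD key []) kmer).getD (fd.getD key []))
      else fd).items
      = fd.items.map (fun p => if p.1 = key then (p.1, pvG kmer p.2) else p) := by
  by_cases h : (fd.getD key []).contains kmer = true
  · rw [if_pos h, PySem.Dict.items_insert_of_contains fd _ hc]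
    apply List.map_congr_left
    intro p hp
    by_cases hk : p.1 = key
    · have hval : fd.getD p.1 [] = p.2 :=
        PySem.Dict.getD_of_mem_items fd (Prod.mk.eta ▸ hp) hnd []
      rw [if_pos (by simp [hk]), if_pos hk]
      subst hk
      rw [hval] at h ⊢
      rw [pvG, if_pos h]
    · rw [if_neg (by simp [hk]), if_neg hk]
  · rw [if_neg h]
    symm
    conv_rhs => rw [← List.map_id fd.items]
    apply List.map_congr_left
    intro p hp
    by_cases hk : p.1 = key
    · have hval : fd.getD p.1 [] = p.2 :=
        PySem.Dict.getD_of_mem_items fd (Prod.mk.eta ▸ hp) hnd []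
      subst hk
      rw [hval] at h
      show (if p.1 = p.1 then (p.1, pvG kmer p.2) else p) = p
      rw [if_pos rfl, pvG, if_neg h]
    · show (if p.1 = key then (p.1, pvG kmer p.2) else p) = p
      rw [if_neg hk]

-- A's inner key loop rewrites every value list in place.
theorem pv_inner_fold (kmer : String) (ks : List String) :
    ∀ (fd : PySem.Dict String (List String)), fd.keys.Nodup → ks.Nodup →
      (∀ k ∈ ks, fd.contains k = true) →
      (ks.foldl (fun fd2 key =>
          if (fd2.getD key []).contains kmer then
            fd2.insert key ((PySem.List.remove? (fd2.getD key []) kmer).getD (fd2.getD key []))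
          else fd2) fd).items
        = fd.items.map (fun p => if p.1 ∈ ks then (p.1, pvG kmer p.2) else p) := by
  induction ks with
  | nil => intro fd _ _ _; simp
  | cons key ks ih =>
      intro fd hnd hks hcont
      rw [List.foldl_cons]
      have hstep := pv_step_items kmer key fd hnd (hcont key (by simp))
      set fd' := (if (fd.getD key []).contains kmer then
            fd.insert key ((PySem.List.remove? (fd.getD key []) kmer).getD (fd.getD key []))
          else fd) with hfd'
      have hkeys : fd'.keys = fd.keys := by
        show fd'.items.map Prod.fst = fd.items.map Prod.fst
        rw [hstep, List.map_map]
        apply List.map_congr_left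
        intro p hp
        by_cases hk : p.1 = key <;> simp [hk]
      have hnd' : fd'.keys.Nodup := hkeys ▸ hnd
      have hcont' : ∀ k ∈ ks, fd'.contains k = true := by
        intro k hk
        rw [PySem.Dict.contains_iff_mem_keys, hkeys, ← PySem.Dict.contains_iff_mem_keys]
        exact hcont k (by simp [hk])
      rw [ih fd' hnd' hks.of_cons hcont', hstep, List.map_map]
      apply List.map_congr_left
      intro p hp
      by_cases hk : p.1 = key
      · have hkn : key ∉ ks := (List.nodup_cons.mp hks).1
        simp [hk, hkn]
      · by_cases hk2 : p.1 ∈ ks <;> simp [hk, hk2]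

-- A's outer loop factors into an independent fold on each value list.
theorem pv_outer_fold (all : List String) (n0 : Nat) :
    ∀ (s : List String) (fd : PySem.Dict String (List String)), fd.keys.Nodup → fd.size = n0 →
      (s.foldl (fun fd kmer =>
          if PySem.List.count all kmer = fd.size then
            fd.keys.foldl (fun fd2 key =>
              if (fd2.getD key []).contains kmer then
                fd2.insert key ((PySem.List.remove? (fd2.getD key []) kmer).getD (fd2.getD key []))
              else fd2) fd
          else fd) fd).items
        = fd.items.map (fun p => (p.1,
            s.foldl (fun l kmer => if PySem.List.count all kmer = n0 then pvG kmer l else l) p.2)) := by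
  intro s
  induction s with
  | nil => intro fd _ _; simp
  | cons x s ih =>
      intro fd hnd hsz
      simp only [List.foldl_cons]
      by_cases hc : PySem.List.count all x = n0
      · rw [if_pos (hsz ▸ hc)]
        simp only [if_pos hc]
        have hstep := pv_inner_fold x fd.keys fd hnd hnd
          (fun k hk => (PySem.Dict.contains_iff_mem_keys fd k).mpr hk)
        set fd' := fd.keys.foldl (fun fd2 key =>
            if (fd2.getD key []).contains x then
              fd2.insert key ((PySem.List.remove? (fd2.getD key []) x).getD (fd2.getD key []))
            else fd2) fd with hfd'
        have hstep' : fd'.items = fd.items.map (fun p => (p.1, pvG x p.2)) := by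
          rw [hstep]
          apply List.map_congr_left
          intro p hp
          have : p.1 ∈ fd.keys := List.mem_map_of_mem hp
          simp [this]
        have hkeys : fd'.keys = fd.keys := by
          show fd'.items.map Prod.fst = fd.items.map Prod.fst
          rw [hstep', List.map_map]; rfl
        have hsz' : fd'.size = n0 := by
          show fd'.items.length = n0
          rw [hstep', List.length_map]; exact hsz
        rw [ih fd' (hkeys ▸ hnd) hsz', hstep', List.map_map]
        rfl
      · rw [if_neg (hsz ▸ hc)]
        simp only [if_neg hc]
        exact ih fd hnd hsz

-- per-list: folding remove-first over enough triggers removes exactly the triggered elements.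
theorem pv_fold_filter (all : List String) (n0 : Nat) :
    ∀ (s l : List String),
      (∀ x, PySem.List.count all x = n0 → List.count x l ≤ List.count x s) →
      s.foldl (fun l kmer => if PySem.List.count all kmer = n0 then pvG kmer l else l) l
        = l.filter (fun k => !decide (PySem.List.count all k = n0)) := by
  intro s
  induction s with
  | nil =>
      intro l h
      rw [List.foldl_nil]
      symm
      rw [List.filter_eq_self]
      intro a ha
      simp only [Bool.not_eq_eq_eq_not, Bool.not_true, decide_eq_false_iff_not]
      intro hcond
      have h0 := h a hcond
      simp only [List.count_nil, Nat.le_zero] at h0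
      exact absurd ha (List.count_eq_zero.mp h0)
  | cons x s ih =>
      intro l h
      rw [List.foldl_cons]
      by_cases hc : PySem.List.count all x = n0
      · rw [if_pos hc, pvG_eq_erase]
        rw [ih (l.erase x) ?_]
        · exact pv_filter_erase _ x (by simp [PySem.List.count_eq] at hc; simp [hc]) l
        · intro y hy
          by_cases hxy : y = x
          · subst hxy
            have := h y hc
            rw [List.count_cons_self] at this
            rw [List.count_erase_self]
            omega
          · rw [List.count_erase_of_ne hxy]
            have h2 := h y hy
            rwa [List.count_cons_of_ne (Ne.symm hxy)] at h2
      · rw [if_neg hc]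
        apply ih l
        intro y hy
        have hxy : y ≠ x := fun he => hc (he ▸ hy)
        have h2 := h y hy
        rwa [List.count_cons_of_ne (Ne.symm hxy)] at h2

theorem pv_main (kmerdict : List (String × List String)) :
    rem_redun_kmer kmerdict = rem_redun_kmer_alt kmerdict := by
  unfold rem_redun_kmer rem_redun_kmer_alt
  simp only [pv_all_kmers_eq, List.nil_append]
  set d := PySem.Dict.ofList kmerdict with hd
  set all := d.values.flatten with hall
  rw [pv_outer_fold all d.size all d (PySem.Dict.nodup_keys_ofList kmerdict) rfl]
  apply List.map_congr_left
  intro p hp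
  have hmemv : p.2 ∈ d.values := List.mem_map_of_mem hp
  have hsub : p.2.Sublist all := List.sublist_flatten_of_mem hmemv
  rw [pv_fold_filter all d.size all p.2 (fun x _ => hsub.count_le x)]
  refine congrArg _ ?_
  apply List.filter_congr
  intro a ha
  rw [pv_counts_spec, PySem.Dict.getD_empty]
  simp [PySem.List.count_eq]
  exact Iff.rfl

-- ===== VERDICT (by name: the statement is the Claim_ definition above) =====
theorem rem_redun_kmer_spec : Claim_equal_rem_redun_kmer := by
  intro kmerdict _
  unfold Spec_rem_redun_kmer
  exact pv_main kmerdict
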